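-- pv_equiv track=rewrite | github.com/orut34iop/MediaHelper | 115网盘专用-文件夹拖拽并生成文件路径列表.py | scan_string
-- ===== SOURCE A (Python) =====
-- def scan_string(input_string):
--     """解析拖拽数据中的路径"""
--     result = []
--     i = 0
--     while i < len(input_string):
--         if input_string[i] == '{':
--             i += 1
--             start = i
--             while i < len(input_string) and input_string[i] != '}':
--                 i += 1
--             result.append(input_string[start:i])
--             i += 1
--         else:
--             start = i
--             while i < len(input_string) and input_string[i] != ' ':
--                 i += 1
--             result.append(input_string[start:i])
--
--         if i < len(input_string) and input_string[i] == ' ':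
--             i += 1
--
--     return [path for path in result if path.strip()]
-- ===== SOURCE B (Python) =====
-- import re
--
-- # One token per regex match: a braced chunk (closing brace optional, so an
-- # unterminated '{...' captures to the end, spaces included) or a run of
-- # non-space characters.  finditer skips the separating spaces.
-- _TOKEN = re.compile(r'\{([^}]*)\}?|([^ ]+)')
--
--
-- def scan_string(input_string):
--     result = [m.group(1) if m.group(1) is not None else m.group(2)
--               for m in _TOKEN.finditer(input_string)]
--     return [path for path in result if path.strip()]
-- ===== Notes on version B (the rewrite author's own statement) =====
-- stated objective: idiomatic
-- what changed: Replaced the hand-rolled index-walking while-loop (with manual inner scans and a one-space skip) by a single re.finditer pass over the alternation r'\{([^}]*)\}?|([^ ]+)', keeping the final strip-filter.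
import Mathlib
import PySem

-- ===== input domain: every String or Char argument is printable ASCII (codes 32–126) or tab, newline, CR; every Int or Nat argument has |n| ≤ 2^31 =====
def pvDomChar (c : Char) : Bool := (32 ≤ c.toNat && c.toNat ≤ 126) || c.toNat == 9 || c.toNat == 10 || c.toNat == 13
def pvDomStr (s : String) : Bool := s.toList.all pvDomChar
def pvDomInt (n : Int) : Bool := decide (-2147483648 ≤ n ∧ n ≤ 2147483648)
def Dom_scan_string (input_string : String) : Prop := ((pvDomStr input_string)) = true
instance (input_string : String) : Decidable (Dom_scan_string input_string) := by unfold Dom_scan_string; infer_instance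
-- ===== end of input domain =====

-- B replaces A's index-walking while-loop by a regex-style left-to-right match
-- scanner (re.finditer over a fixed alternation); objective: idiomatic (and measured faster in a timing run).

-- ===== PORT A =====
-- the inner 'while' loops of A: first index j ≥ i with cs[j] = stop (else len(cs))
def scanStringFind (cs : List Char) (stop : Char) (i : Nat) : Nat :=
  if h : i < cs.length then
    if cs[i] = stop then i else scanStringFind cs stop (i + 1)
  else i
termination_by cs.length - i

-- the port's termination needs these two facts about the inner loops (cited in decreasing_by)
theorem scanStringFind_ge (cs : List Char) (stop : Char) (i : Nat) :
    i ≤ scanStringFind cs stop i := by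
  rw [scanStringFind]
  split
  · split
    · exact le_refl i
    · exact Nat.le_trans (Nat.le_succ i) (scanStringFind_ge cs stop (i + 1))
  · exact le_refl i
termination_by cs.length - i

theorem scanStringFind_stop (cs : List Char) (stop : Char) (i : Nat)
    (h : scanStringFind cs stop i < cs.length) :
    cs[scanStringFind cs stop i]? = some stop := by
  rw [scanStringFind] at h ⊢
  by_cases h1 : i < cs.length
  · by_cases h2 : cs[i] = stop
    · simp [h1, h2]
    · simp only [dif_pos h1, if_neg h2] at h ⊢
      exact scanStringFind_stop cs stop (i + 1) h
  · simp only [dif_neg h1] at h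
    omega
termination_by cs.length - i

-- A's trailing "if i < len(input_string) and input_string[i] == ' ': i += 1"
def scanStringSkip (cs : List Char) (i : Nat) : Nat :=
  if h : i < cs.length then (if cs[i] = ' ' then i + 1 else i) else i

theorem scanStringSkip_ge (cs : List Char) (i : Nat) : i ≤ scanStringSkip cs i := by
  unfold scanStringSkip; split <;> [skip; omega]; split <;> omega

-- A's outer while-loop; result accumulated as the returned list
def scanStringLoop (cs : List Char) (i : Nat) : List (List Char) :=
  if h : i < cs.length then
    if cs[i] = '{' then
      let j := scanStringFind cs '}' (i + 1)
      -- input_string[start:j] with 0 ≤ start ≤ j ≤ len: exactly drop/take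
      ((cs.drop (i + 1)).take (j - (i + 1))) :: scanStringLoop cs (scanStringSkip cs (j + 1))
    else
      let j := scanStringFind cs ' ' i
      ((cs.drop i).take (j - i)) :: scanStringLoop cs (scanStringSkip cs j)
  else []
termination_by cs.length - i
decreasing_by
  · have := scanStringFind_ge cs '}' (i + 1)
    have := scanStringSkip_ge cs (scanStringFind cs '}' (i + 1) + 1)
    omega
  · have hge := scanStringFind_ge cs ' ' i
    have hsk := scanStringSkip_ge cs (scanStringFind cs ' ' i)
    by_cases heq : scanStringFind cs ' ' i = i
    · -- the inner loop stopped immediately, so cs[i] = ' ' and the skip advances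
      have hstop := scanStringFind_stop cs ' ' i (by omega)
      rw [heq, List.getElem?_eq_getElem h] at hstop
      have hs : cs[i] = ' ' := by simpa using hstop
      have : scanStringSkip cs (scanStringFind cs ' ' i) = i + 1 := by
        unfold scanStringSkip
        simp [heq, h, hs]
      omega
    · omega

def scan_string (input_string : String) : List String :=
  let result := scanStringLoop input_string.toList 0
  -- [path for path in result if path.strip()]
  (result.map (fun t => String.ofList t)).filter (fun p => !(PySem.Str.strip p).isEmpty)

-- ===== PORT B =====
-- Source B iterates re.finditer(r'\{([^}]*)\}?|([^ ]+)') left to right.  For this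
-- fixed pattern that scanner is exactly: at ' ' neither alternative matches and
-- the scan position advances one char; at '{' the first alternative matches the
-- content up to an optional '}' (to the end if unterminated); otherwise the
-- second alternative matches the maximal run of non-space characters.
def scanStringAltLoop : List Char → List (List Char)
  | [] => []
  | c :: rest =>
    if c = ' ' then scanStringAltLoop rest
    else if c = '{' then
      let tok := rest.takeWhile (fun d => d != '}')
      tok :: scanStringAltLoop (rest.drop (tok.length + 1))
    else
      let tok := (c :: rest).takeWhile (fun d => d != ' ')
      tok :: scanStringAltLoop ((c :: rest).drop tok.length)
termination_by cs => cs.length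
decreasing_by
  · simp
  · simp only [List.length_drop, List.length_cons]; omega
  · rename_i h1 _
    have ht : ((c :: rest).takeWhile (fun d => d != ' ')).length
        = (rest.takeWhile (fun d => d != ' ')).length + 1 := by
      rw [List.takeWhile_cons, if_pos (by simp [h1])]; simp
    simp only [List.length_drop, List.length_cons, ht]; omega

def scan_string_alt (input_string : String) : List String :=
  let result := scanStringAltLoop input_string.toList
  (result.map (fun t => String.ofList t)).filter (fun p => !(PySem.Str.strip p).isEmpty)

-- ===== PRECONDITION & SPEC =====
def Spec_scan_string (input_string : String) (out : List String) : Prop := out = scan_string_alt input_string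
instance (input_string : String) (out : List String) : Decidable (Spec_scan_string input_string out) := by unfold Spec_scan_string; infer_instance

-- ===== CLAIM (what is proved, stated in full; the proofs are below) =====
def Claim_equal_scan_string : Prop := ∀ (input_string : String), Dom_scan_string input_string → Spec_scan_string input_string (scan_string input_string)

-- ===== LEMMAS AND PROOFS =====

-- the token kept by the final comprehension
def pvKeep (t : List Char) : Bool := !(PySem.Str.strip (String.ofList t)).isEmpty

theorem pvKeep_nil : pvKeep [] = false := by decide

-- equation lemmas for B's scanner
theorem alt_nil : scanStringAltLoop [] = [] := by rw [scanStringAltLoop]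

theorem alt_space (rest : List Char) :
    scanStringAltLoop (' ' :: rest) = scanStringAltLoop rest := by
  rw [scanStringAltLoop]; simp

theorem alt_brace (rest : List Char) :
    scanStringAltLoop ('{' :: rest)
      = (rest.takeWhile (fun d => d != '}'))
          :: scanStringAltLoop (rest.drop ((rest.takeWhile (fun d => d != '}')).length + 1)) := by
  rw [scanStringAltLoop]; simp

theorem alt_other (c : Char) (rest : List Char) (h1 : c ≠ ' ') (h2 : c ≠ '{') :
    scanStringAltLoop (c :: rest)
      = ((c :: rest).takeWhile (fun d => d != ' '))
          :: scanStringAltLoop ((c :: rest).drop ((c :: rest).takeWhile (fun d => d != ' ')).length) := by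
  rw [scanStringAltLoop]; simp [h1, h2]

-- scanStringFind = index + length of the takeWhile on the suffix
theorem scanStringFind_eq (cs : List Char) (stop : Char) (i : Nat) :
    scanStringFind cs stop i = i + ((cs.drop i).takeWhile (fun d => d != stop)).length := by
  rw [scanStringFind]
  by_cases h : i < cs.length
  · rw [dif_pos h, List.drop_eq_getElem_cons h, List.takeWhile_cons]
    by_cases he : cs[i] = stop
    · simp [he]
    · rw [if_neg he, scanStringFind_eq cs stop (i + 1)]
      simp [he]
      omega
  · rw [dif_neg h, List.drop_eq_nil_of_le (by omega)]
    simp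
termination_by cs.length - i

-- skipping the one space A skips is a no-op for B's scanner
theorem alt_skip (cs : List Char) (i : Nat) :
    scanStringAltLoop (cs.drop (scanStringSkip cs i)) = scanStringAltLoop (cs.drop i) := by
  unfold scanStringSkip
  split
  · next h =>
    split
    · next hs =>
      rw [List.drop_eq_getElem_cons h, hs, alt_space]
    · rfl
  · rfl

theorem take_takeWhile_len (cs : List Char) (p : Char → Bool) :
    cs.take (cs.takeWhile p).length = cs.takeWhile p :=
  ((List.prefix_iff_eq_take).mp (List.takeWhile_prefix p)).symm

-- main invariant: after the strip-filter, A's loop from index i agrees with B's scanner on the suffix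
theorem loop_filter_eq (cs : List Char) (i : Nat) :
    (scanStringLoop cs i).filter pvKeep = (scanStringAltLoop (cs.drop i)).filter pvKeep := by
  rw [scanStringLoop]
  split
  · next h =>
    split
    · next hb =>
      -- brace branch
      have hdrop : cs.drop i = '{' :: cs.drop (i + 1) := by
        rw [List.drop_eq_getElem_cons h, hb]
      set tw := (cs.drop (i + 1)).takeWhile (fun d => d != '}') with htw
      have hj : scanStringFind cs '}' (i + 1) = i + 1 + tw.length :=
        scanStringFind_eq cs '}' (i + 1)
      have htok : (cs.drop (i + 1)).take (scanStringFind cs '}' (i + 1) - (i + 1)) = tw := by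
        rw [hj]; simpa using take_takeWhile_len (cs.drop (i + 1)) (fun d => d != '}')
      have hrec : (cs.drop (i + 1)).drop (tw.length + 1) = cs.drop (scanStringFind cs '}' (i + 1) + 1) := by
        rw [List.drop_drop]; congr 1; omega
      have hrest := loop_filter_eq cs (scanStringSkip cs (scanStringFind cs '}' (i + 1) + 1))
      rw [alt_skip, ← hrec] at hrest
      dsimp only
      rw [hdrop, alt_brace, ← htw, htok, List.filter_cons, List.filter_cons, hrest]
    · next hb =>
      by_cases hs : cs[i] = ' '
      · -- A emits an empty token (dropped by the filter); B just skips the space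
        have hj : scanStringFind cs ' ' i = i := by
          rw [scanStringFind]; simp [h, hs]
        have hskip : scanStringSkip cs i = i + 1 := by
          unfold scanStringSkip; simp [h, hs]
        have hdrop2 : cs.drop i = ' ' :: cs.drop (i + 1) := by
          rw [List.drop_eq_getElem_cons h, hs]
        dsimp only
        have hrest := loop_filter_eq cs (i + 1)
        rw [hj]
        rw [hskip]
        rw [hdrop2]
        rw [alt_space]
        rw [List.filter_cons]
        simpa [pvKeep_nil] using hrest
      · -- ordinary token: identical on both sides
        have hdrop : cs.drop i = cs[i] :: cs.drop (i + 1) := List.drop_eq_getElem_cons h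
        set tw := (cs.drop i).takeWhile (fun d => d != ' ') with htw
        have hj : scanStringFind cs ' ' i = i + tw.length := scanStringFind_eq cs ' ' i
        have htok : (cs.drop i).take (scanStringFind cs ' ' i - i) = tw := by
          rw [hj]; simpa using take_takeWhile_len (cs.drop i) (fun d => d != ' ')
        have hrec : (cs.drop i).drop tw.length = cs.drop (scanStringFind cs ' ' i) := by
          rw [List.drop_drop]; congr 1; omega
        have hrest := loop_filter_eq cs (scanStringSkip cs (scanStringFind cs ' ' i))
        rw [alt_skip, ← hrec] at hrest
        dsimp only
        rw [hdrop]
        rw [alt_other _ _ hs hb, ← hdrop, ← htw, htok, List.filter_cons, List.filter_cons, hrest]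
  · next h =>
    rw [List.drop_eq_nil_of_le (by omega), alt_nil]
termination_by cs.length - i
decreasing_by
  · omega
  · have hsk := scanStringSkip_ge cs (scanStringFind cs ' ' i)
    have hlen : 0 < tw.length := by
      rw [htw, hdrop, List.takeWhile_cons, if_pos (by simpa using hs)]
      simp
    omega
  · have := scanStringFind_ge cs '}' (i + 1)
    have := scanStringSkip_ge cs (scanStringFind cs '}' (i + 1) + 1)
    omega

-- ===== VERDICT (by name: the statement is the Claim_ definition above) =====
theorem scan_string_spec : Claim_equal_scan_string := by
  intro s _
  unfold Spec_scan_string scan_string scan_string_alt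
  simp only [List.filter_map]
  have hpred : ((fun p => !(PySem.Str.strip p).isEmpty) ∘ fun t => String.ofList t) = pvKeep := by
    funext t; simp [pvKeep, Function.comp]
  rw [hpred]
  have := loop_filter_eq s.toList 0
  simp only [List.drop_zero] at this
  rw [this]
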